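-- pv_equiv track=rewrite | github.com/deserteagle735/memento | memento/utils.py | _incGuid
-- ===== SOURCE A (Python) =====
-- import string
--
-- _base91_extra_chars = "!#$%&()*+,-./:;<=>?@[]^_`{|}~"
--
-- def _incGuid(guid):
--     s = string; table = s.ascii_letters + s.digits + _base91_extra_chars
--     idx = table.index(guid[0])
--     if idx + 1 == len(table):
--         # overflow
--         guid = table[0] + _incGuid(guid[1:])
--     else:
--         guid = table[idx+1] + guid[1:]
--     return guid
-- ===== SOURCE B (Python) =====
-- import string
--
-- _base91_extra_chars = "!#$%&()*+,-./:;<=>?@[]^_`{|}~"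
--
-- def _incGuid(guid):
--     table = string.ascii_letters + string.digits + _base91_extra_chars
--     maxc = table[-1]
--     p = 0
--     while guid[p] == maxc:      # raises IndexError when the carry runs off the end (or guid is empty), like A
--         p += 1
--     idx = table.index(guid[p])  # raises ValueError on a non-table char, like A
--     return table[0] * p + table[idx + 1] + guid[p + 1:]
-- ===== Notes on version B (the rewrite author's own statement) =====
-- stated objective: alternative
-- what changed: Replaces A's char-by-char recursion (rebuilding the string on the way back up) with a single forward while-loop that counts the run of leading maximum characters and then returns one concatenation table[0]*p + incremented char + untouched tail.
import Mathlib
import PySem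

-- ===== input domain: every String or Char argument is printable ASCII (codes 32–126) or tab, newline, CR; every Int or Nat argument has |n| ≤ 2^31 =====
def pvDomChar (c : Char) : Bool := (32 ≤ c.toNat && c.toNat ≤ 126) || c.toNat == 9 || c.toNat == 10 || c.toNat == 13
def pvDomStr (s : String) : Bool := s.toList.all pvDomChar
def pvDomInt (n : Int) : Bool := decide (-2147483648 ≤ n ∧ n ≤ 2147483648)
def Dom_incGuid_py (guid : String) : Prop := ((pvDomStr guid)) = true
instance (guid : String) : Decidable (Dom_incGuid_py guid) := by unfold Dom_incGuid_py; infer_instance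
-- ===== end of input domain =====

-- B replaces A's char-by-char recursion by one scan counting the leading max-chars and a single
-- concatenation (objective: alternative decomposition; same asymptotic cost).

-- the shared 91-char table: string.ascii_letters + string.digits + _base91_extra_chars
def pvTable : List Char :=
  ("abcdefghijklmnopqrstuvwxyzABCDEFGHIJKLMNOPQRSTUVWXYZ0123456789!#$%&()*+,-./:;<=>?@[]^_`{|}~").toList

-- ===== PORT A =====
-- literal recursion of A over the characters; 'none' = the Python raises (IndexError on [],
-- ValueError on a char outside the table)
def incGuidA : List Char → Option (List Char)
  | [] => none                                   -- guid[0] raises IndexError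
  | c :: rest =>
    match PySem.List.index? pvTable c with       -- idx = table.index(guid[0])
    | none => none                               -- ValueError
    | some idx =>
      if idx + 1 = pvTable.length then           -- overflow: table[0] + _incGuid(guid[1:])
        match incGuidA rest, pvTable[0]? with
        | some r, some c0 => some (c0 :: r)
        | _, _ => none
      else                                       -- table[idx+1] + guid[1:]
        match pvTable[idx + 1]? with
        | none => none
        | some c' => some (c' :: rest)

def incGuid_py (guid : String) : String :=
  ((incGuidA guid.toList).map String.ofList).getD ""   -- getD only on raising inputs, excluded by Pre_

-- ===== PORT B =====
-- 'while guid[p] == maxc: p += 1' : returns the final p, none = IndexError when p runs off the end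
def incGuidBScan (maxc : Char) : List Char → Option Nat
  | [] => none
  | c :: rest => if c = maxc then (incGuidBScan maxc rest).map (· + 1) else some 0

def incGuidB (g : List Char) : Option (List Char) :=
  match PySem.List.pyGet? pvTable (-1) with      -- maxc = table[-1]
  | none => none
  | some maxc =>
    match incGuidBScan maxc g with
    | none => none
    | some p =>
      match PySem.List.pyGet? g (p : Int) with   -- guid[p]
      | none => none
      | some c =>
        match PySem.List.index? pvTable c with   -- idx = table.index(guid[p])
        | none => none
        | some idx =>
          match pvTable[0]?, (pvTable : List Char)[idx + 1]? with
          | some c0, some c1 =>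
            -- table[0] * p + table[idx+1] + guid[p+1:]
            some (List.replicate p c0 ++ c1 :: PySem.List.slice g (some ((p : Int) + 1)) none)
          | _, _ => none

def incGuid_py_alt (guid : String) : String :=
  ((incGuidB guid.toList).map String.ofList).getD ""

-- ===== PRECONDITION & SPEC =====
-- Pre_ excludes exactly the inputs on which the Python raises: strings consisting only of '~'
-- (incl. the empty string; IndexError) and strings whose first non-'~' char is not in the table (ValueError).
def Pre_incGuid_py (guid : String) : Prop :=
  guid.toList.dropWhile (fun c => c = '~') ≠ [] ∧
  (guid.toList.dropWhile (fun c => c = '~')).headD ' ' ∈ pvTable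
instance (guid : String) : Decidable (Pre_incGuid_py guid) := by unfold Pre_incGuid_py; infer_instance

def pvWitness_incGuid_py : String := "abc"

def Spec_incGuid_py (guid : String) (out : String) : Prop := out = incGuid_py_alt guid
instance (guid : String) (out : String) : Decidable (Spec_incGuid_py guid out) := by unfold Spec_incGuid_py; infer_instance

-- ===== CLAIM (what is proved, stated in full; the proofs are below) =====
def Claim_equal_incGuid_py : Prop := ∀ (guid : String), Dom_incGuid_py guid → Pre_incGuid_py guid → Spec_incGuid_py guid (incGuid_py guid)

-- ===== LEMMAS AND PROOFS =====

theorem pvTable_max : PySem.List.pyGet? pvTable (-1) = some '~' := by decide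

theorem index?_tilde : PySem.List.index? pvTable '~' = some 90 := by decide

theorem index?_ne_tilde {c : Char} {k : Nat} (hc : c ≠ '~')
    (h : PySem.List.index? pvTable c = some k) : k + 1 ≠ pvTable.length := by
  obtain ⟨hk, hv, -⟩ := PySem.List.getElem_of_index?_eq_some h
  intro hlen
  have hk90 : k = 90 := by
    have : pvTable.length = 91 := by decide
    omega
  subst hk90
  have h9 : pvTable[90]? = some c := by
    rw [List.getElem?_eq_getElem hk]
    exact congrArg some hv
  have h9' : pvTable[90]? = some '~' := by decide
  rw [h9'] at h9
  exact hc (Option.some.inj h9).symm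

-- B on a leading max-char peels it off exactly as A's overflow branch does
theorem incGuidB_cons_max (rest : List Char) :
    incGuidB ('~' :: rest) = (incGuidB rest).map (fun r => 'a' :: r) := by
  unfold incGuidB
  rw [pvTable_max]
  cases hscan : incGuidBScan '~' rest with
  | none => simp [incGuidBScan, hscan]
  | some p =>
    simp only [incGuidBScan, hscan, reduceIte, Option.map_some]
    have hget : PySem.List.pyGet? ('~' :: rest) ((p + 1 : Nat) : Int)
        = PySem.List.pyGet? rest (p : Int) := by
      push_cast
      exact PySem.List.pyGet?_cons_succ ..
    rw [hget]
    cases hc : PySem.List.pyGet? rest (p : Int) with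
    | none => simp
    | some c =>
      cases hidx : List.idxOf? c pvTable with
      | none => simp [hidx]
      | some idx =>
        cases h1 : (pvTable : List Char)[idx + 1]? with
        | none => simp [hidx, h1, show pvTable[0]? = some 'a' from by decide]
        | some c1 =>
          have ha : pvTable[0]? = some 'a' := by decide
          have hsl : PySem.List.slice ('~' :: rest) (some ((p : Int) + 1 + 1)) none
              = PySem.List.slice rest (some ((p : Int) + 1)) none := by
            have e1 : (p : Int) + 1 + 1 = ((p + 2 : Nat) : Int) := by push_cast; ring
            have e2 : ((p : Int) + 1) = ((p + 1 : Nat) : Int) := by push_cast; ring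
            rw [e1, e2, PySem.List.slice_from_natCast, PySem.List.slice_from_natCast]
            rfl
          simp [hidx, h1, ha, hsl, List.replicate_succ]

-- the two ports agree as Option-valued computations on every input
theorem incGuidA_eq_B (g : List Char) : incGuidA g = incGuidB g := by
  induction g with
  | nil => decide
  | cons c rest ih =>
    by_cases hc : c = '~'
    · subst hc
      rw [incGuidB_cons_max, ← ih, incGuidA, index?_tilde]
      dsimp only
      rw [if_pos (by decide : (90 : Nat) + 1 = pvTable.length)]
      cases h : incGuidA rest with
      | none => simp
      | some r => simp [show pvTable[0]? = some 'a' from by decide]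
    · rw [incGuidA]
      unfold incGuidB
      rw [pvTable_max]
      have h0 : PySem.List.pyGet? (c :: rest) ((0 : Nat) : Int) = some c :=
        PySem.List.pyGet?_zero_cons c rest
      simp only [incGuidBScan, if_neg hc, h0]
      cases hidx : List.idxOf? c pvTable with
      | none => simp [hidx, PySem.List.index?_eq_idxOf?]
      | some idx =>
        have hidx' : PySem.List.index? pvTable c = some idx := by
          rw [PySem.List.index?_eq_idxOf?]; exact hidx
        have hne := index?_ne_tilde hc hidx'
        cases h1 : (pvTable : List Char)[idx + 1]? with
        | none => simp [hidx, h1, hne, PySem.List.index?_eq_idxOf?]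
        | some c1 =>
          have ha : pvTable[0]? = some 'a' := by decide
          have hsl : PySem.List.slice (c :: rest) (some (1 : Int)) none = rest := by
            have e : (1 : Int) = ((1 : Nat) : Int) := by norm_num
            rw [e, PySem.List.slice_from_natCast]
            rfl
          simp [hidx, h1, hne, ha, hsl, PySem.List.index?_eq_idxOf?]

-- ===== VERDICT (by name: the statement is the Claim_ definition above) =====
theorem incGuid_py_spec : Claim_equal_incGuid_py := by
  intro guid _ _
  unfold Spec_incGuid_py incGuid_py incGuid_py_alt
  rw [incGuidA_eq_B]
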